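-- pv_equiv track=rewrite | github.com/AllenAnZifeng/leetcode | Coding Competitions/KickStart/2020/plates.py | dp_save_space
-- ===== SOURCE A (Python) =====
-- def dp_save_space(n,items):
--     partialSum = []  # partialSum[i][x] --> the sum of x plates from i th stack
--     for i in range(len(items)):
--         stack = [0]
--         for j in range(len(items[0])):
--             stack.append(sum(items[i][:j + 1]))
--         partialSum.append(stack)
--     # p(partialSum)
--
--     dp = [0 for j in range(n + 1)]
--     for i in range(n + 1):
--         if i < len(items[0]):
--             dp[i] = partialSum[0][i]
--         else:
--             dp[i] = partialSum[0][-1]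
--
--     for i in range(1, len(items)):
--         ndp = [0 for j in range(n + 1)]
--         for j in range(1, n + 1):
--             for x in range(min(j + 1, len(items[0]) + 1)):
--                 ndp[j] = max(ndp[j], partialSum[i][x] + dp[j - x])
--         dp=ndp
--         # p(dp)
--     return dp[-1]
-- ===== SOURCE B (Python) =====
-- def dp_save_space(n, items):
--     # Top-down memoized knapsack over per-stack prefix sums (same return values as A).
--     P = len(items[0])
--     prefix = []
--     for row in items:
--         acc = [0]
--         s = 0
--         for v in row[:P]:
--             s += v
--             acc.append(s)
--         while len(acc) < P + 1:
--             acc.append(s)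
--         prefix.append(acc)
--
--     memo = [None] * len(items)  # per-stack memo rows, created lazily
--
--     def best(i, j):
--         if i == 0:
--             return prefix[0][min(j, P)]
--         mi = memo[i]
--         if mi is None:
--             mi = memo[i] = [None] * (n + 1)
--         r = mi[j]
--         if r is not None:
--             return r
--         pi = prefix[i]
--         r = 0
--         for x in range(min(j, P) + 1):
--             v = pi[x] + best(i - 1, j - x)
--             if v > r:
--                 r = v
--         mi[j] = r
--         return r
--
--     return best(len(items) - 1, n)
-- ===== Notes on version B (the rewrite author's own statement) =====
-- stated objective: alternative
-- what changed: A's bottom-up row-by-row DP over mutable arrays (with a separately built partial-sum table via repeated list slicing) is replaced by per-stack prefix sums built in one accumulating pass plus a top-down memoized recursion best(i, j); Pre_ excludes exactly the inputs where A raises IndexError (empty items, or n < 0).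
import Mathlib
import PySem

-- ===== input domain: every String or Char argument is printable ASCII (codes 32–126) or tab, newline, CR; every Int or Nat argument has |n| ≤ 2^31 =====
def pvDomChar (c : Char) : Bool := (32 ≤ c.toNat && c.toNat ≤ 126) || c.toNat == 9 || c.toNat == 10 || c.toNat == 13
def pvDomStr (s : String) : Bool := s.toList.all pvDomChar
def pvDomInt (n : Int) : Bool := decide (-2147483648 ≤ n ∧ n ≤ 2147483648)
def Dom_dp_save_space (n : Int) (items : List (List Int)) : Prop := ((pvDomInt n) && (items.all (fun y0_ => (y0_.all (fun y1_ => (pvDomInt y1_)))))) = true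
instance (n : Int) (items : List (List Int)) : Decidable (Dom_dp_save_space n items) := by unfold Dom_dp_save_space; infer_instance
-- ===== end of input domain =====

-- B replaces A's bottom-up row-by-row table with per-stack prefix sums plus a top-down
-- memoized recursion best(i, j) (objective: alternative decomposition, same values).

-- ===== PORT A =====
-- literal transliteration of A: partialSum table, initial dp row from stack 0, then
-- for each further stack a fresh ndp built by the triple loop mutating ndp[j].
def dp_save_space (n : Int) (items : List (List Int)) : Int :=
  let m := items.length
  let P := (items.getD 0 []).length
  let partialSum : List (List Int) :=
    (List.range m).foldl (fun ps i =>
      ps ++ [ (List.range P).foldl (fun stack (j : Nat) =>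
                stack ++ [ (PySem.List.slice (items.getD i []) none (some ((j : Int) + 1))).sum ])
              [0] ]) []
  let nn := (n + 1).toNat
  -- dp/ndp are Python lists (arrays): kept as Array Int so index reads/writes are O(1)
  let dp : Array Int :=
    ((List.range nn).map (fun i =>
      if i < P then (partialSum.getD 0 []).getD i 0
      else PySem.List.pyGetD (partialSum.getD 0 []) (-1) 0)).toArray
  let dp :=
    (List.range' 1 (m - 1)).foldl (fun dp i =>
      let ndp : Array Int := ((List.range nn).map (fun _ => (0 : Int))).toArray
      (List.range' 1 (nn - 1)).foldl (fun ndp j =>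
        (List.range (min (j + 1) (P + 1))).foldl (fun ndp x =>
          ndp.setIfInBounds j (max (ndp.getD j 0)
                         ((partialSum.getD i []).getD x 0 + dp.getD (j - x) 0))) ndp) ndp) dp
  PySem.List.pyGetD dp.toList (-1) 0

-- ===== PORT B =====
-- B-side helpers: prefix-sum row (accumulate then pad), top-down recursion best(i, j)
-- (the Python memo dict only caches values; the recursion computes the same values).
def altPrefixRow (P : Nat) (row : List Int) : List Int :=
  let p := (row.take P).foldl (fun (acc : List Int × Int) v => (acc.1 ++ [acc.2 + v], acc.2 + v))
             (([0] : List Int), (0 : Int))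
  p.1 ++ List.replicate (P + 1 - p.1.length) p.2

def altBest (P : Nat) (pre : List (List Int)) : Nat → Nat → Int
  | 0, j => (pre.getD 0 []).getD (min j P) 0
  | i + 1, j =>
      (List.range (min j P + 1)).foldl
        (fun r x => max r ((pre.getD (i + 1) []).getD x 0 + altBest P pre i (j - x))) 0

def dp_save_space_alt (n : Int) (items : List (List Int)) : Int :=
  let P := (items.headD []).length
  let pre := items.map (altPrefixRow P)
  altBest P pre (items.length - 1) n.toNat

-- ===== PRECONDITION & SPEC =====
-- Pre_ excludes exactly the inputs where A raises IndexError: empty items (items[0]) and n < 0 (dp[-1] of an empty dp).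
def Pre_dp_save_space (n : Int) (items : List (List Int)) : Prop := 0 ≤ n ∧ items ≠ []
instance (n : Int) (items : List (List Int)) : Decidable (Pre_dp_save_space n items) := by
  unfold Pre_dp_save_space; infer_instance

def pvWitness_dp_save_space : Int × List (List Int) := (3, [[10, 10, 100, 30], [80, 50, 10, 50]])

def Spec_dp_save_space (n : Int) (items : List (List Int)) (out : Int) : Prop := out = dp_save_space_alt n items
instance (n : Int) (items : List (List Int)) (out : Int) : Decidable (Spec_dp_save_space n items out) := by unfold Spec_dp_save_space; infer_instance

-- ===== CLAIM (what is proved, stated in full; the proofs are below) =====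
def Claim_equal_dp_save_space : Prop := ∀ (n : Int) (items : List (List Int)), Dom_dp_save_space n items → Pre_dp_save_space n items → Spec_dp_save_space n items (dp_save_space n items)

-- ===== LEMMAS AND PROOFS =====

-- canonical prefix-sum row: entry j is the sum of the first j plates (take clamps)
def cRow (P : Nat) (row : List Int) : List Int :=
  (List.range (P + 1)).map (fun j => (row.take j).sum)

theorem aRow_eq_cRow (P : Nat) (row : List Int) :
    (List.range P).foldl (fun stack (j : Nat) =>
        stack ++ [ (PySem.List.slice row none (some ((j : Int) + 1))).sum ]) [0]
      = cRow P row := by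
  rw [PySem.List.foldl_append_singleton_eq_map
        (fun j : Nat => (PySem.List.slice row none (some ((j : Int) + 1))).sum)]
  rw [cRow, List.range_succ_eq_map]
  simp only [List.map_cons, List.map_map, List.take_zero, List.sum_nil, List.singleton_append]
  refine congrArg (0 :: ·) (List.map_congr_left ?_)
  intro j _
  have h : ((j : Int) + 1) = ((j + 1 : Nat) : Int) := by push_cast; ring
  rw [Function.comp_apply, h, PySem.List.slice_to_natCast]

theorem accFold (l : List Int) (init : List Int) (s : Int) :
    l.foldl (fun (acc : List Int × Int) v => (acc.1 ++ [acc.2 + v], acc.2 + v)) (init, s)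
      = (init ++ (List.range l.length).map (fun j => s + (l.take (j+1)).sum), s + l.sum) := by
  induction l generalizing init s with
  | nil => simp
  | cons v tl ih =>
      simp only [List.foldl_cons, ih, List.length_cons, List.range_succ_eq_map,
        List.map_cons, List.map_map, List.sum_cons, List.take_succ_cons, Prod.mk.injEq]
      refine ⟨?_, by ring⟩
      simp only [List.append_assoc, List.singleton_append, List.take_zero, List.sum_nil]
      refine congrArg (init ++ ·) ?_
      rw [show s + (v + 0) = s + v by ring]
      refine congrArg (_ :: ·) (List.map_congr_left ?_)
      intro j _
      simp [Nat.succ_eq_add_one]; ring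

theorem bRow_eq_cRow (P : Nat) (row : List Int) : altPrefixRow P row = cRow P row := by
  unfold altPrefixRow cRow
  rw [accFold]
  simp only [zero_add, List.cons_append, List.length_cons,
    List.length_map, List.length_range, List.length_take, List.nil_append]
  refine List.ext_getElem (by simp) ?_
  intro i h1 h2
  simp only [List.length_map, List.length_range] at h2
  rcases i with _ | j
  · simp
  · rw [List.getElem_cons_succ]
    have hjP : j < P := by omega
    by_cases hj : j < min P row.length
    · rw [List.getElem_append_left (by simp; omega)]
      simp only [List.getElem_map, List.getElem_range]
      rw [List.take_take, Nat.min_eq_left (by omega)]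
    · rw [List.getElem_append_right (by simp; omega)]
      have hrl : row.length ≤ j := by omega
      simp only [List.getElem_replicate, List.getElem_map, List.getElem_range]
      rw [List.take_of_length_le (by omega), List.take_of_length_le (by omega)]

theorem set_map_range {β : Type} (n j : Nat) (h : Nat → β) (v : β) :
    ((List.range n).map h).set j v
      = (List.range n).map (fun t => if t = j then v else h t) := by
  refine List.ext_getElem (by simp) ?_
  intro t h1 h2
  rw [List.getElem_set]
  simp only [List.getElem_map, List.getElem_range]
  by_cases ht : t = j
  · simp [ht]
  · rw [if_neg (fun hh : j = t => ht hh.symm), if_neg ht]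

theorem getD_map_of_lt {α β : Type} (f : α → β) (xs : List α) (i : Nat) (d : β)
    (h : i < xs.length) : (xs.map f).getD i d = f xs[i] := by
  rw [List.getD_eq_getElem _ _ (by simpa using h), List.getElem_map]

theorem table_getD_zero (P : Nat) (items : List (List Int)) (i : Nat) :
    ((items.map (cRow P)).getD i []).getD 0 0 = 0 := by
  by_cases h : i < items.length
  · rw [getD_map_of_lt _ _ _ _ h, cRow, PySem.List.getD_map_range _ _ _ _ (by omega)]
    simp
  · rw [List.getD_eq_default (items.map (cRow P)) [] (by simp only [List.length_map]; omega)]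
    rfl

theorem altBest_zero (P : Nat) (items : List (List Int)) (i : Nat) :
    altBest P (items.map (cRow P)) i 0 = 0 := by
  induction i with
  | zero => rw [altBest, Nat.zero_min, table_getD_zero]
  | succ i ih =>
      rw [altBest, Nat.zero_min, List.range_one]
      simp only [List.foldl_cons, List.foldl_nil, Nat.zero_sub, ih, table_getD_zero]
      simp

-- inner x-loop: repeated ndp[j] = max(ndp[j], f x) is a single set of a max-fold
theorem foldl_set_max (l : List Int) (j : Nat) (hj : j < l.length) (f : Nat → Int) (t : Nat) :
    (List.range t).foldl (fun nd x => nd.set j (max (nd.getD j 0) (f x))) l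
      = l.set j ((List.range t).foldl (fun r x => max r (f x)) (l.getD j 0)) := by
  induction t with
  | zero =>
      simp only [List.range_zero, List.foldl_nil]
      rw [List.getD_eq_getElem l 0 hj, List.set_getElem_self hj]
  | succ t ih =>
      rw [List.range_succ, List.foldl_append, List.foldl_append, ih]
      simp only [List.foldl_cons, List.foldl_nil]
      rw [List.getD_eq_getElem _ 0 (by simpa using hj)]
      simp [List.getElem_set_self, List.set_set, hj]

theorem aTable_eq (P : Nat) (items : List (List Int)) :
    (List.range items.length).foldl (fun ps (i : Nat) =>
      ps ++ [ (List.range P).foldl (fun stack (j : Nat) =>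
                stack ++ [ (PySem.List.slice (items.getD i []) none (some ((j : Int) + 1))).sum ])
              [0] ]) []
      = items.map (cRow P) := by
  rw [PySem.List.foldl_append_singleton_eq_map (fun i : Nat =>
        (List.range P).foldl (fun stack (j : Nat) =>
          stack ++ [ (PySem.List.slice (items.getD i []) none (some ((j : Int) + 1))).sum ]) [0])]
  simp only [List.nil_append]
  refine List.ext_getElem (by simp) ?_
  intro i h1 h2
  simp only [List.getElem_map, List.getElem_range]
  rw [aRow_eq_cRow, List.getD_eq_getElem _ _ (by simpa using h1)]

theorem headD_eq_getD {α : Type} (l : List α) (d : α) : l.headD d = l.getD 0 d := by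
  cases l <;> rfl

theorem bTable_eq (P : Nat) (items : List (List Int)) :
    items.map (altPrefixRow P) = items.map (cRow P) :=
  List.map_congr_left (fun r _ => bRow_eq_cRow P r)

theorem row_aux (P N i : Nat) (items : List (List Int)) (k : Nat) (hk : k ≤ N) :
    (List.range' 1 k).foldl (fun ndp j =>
      (List.range (min (j+1) (P+1))).foldl (fun ndp x =>
        ndp.set j (max (ndp.getD j 0)
          (((items.map (cRow P)).getD (i+1) []).getD x 0 +
           ((List.range (N+1)).map (altBest P (items.map (cRow P)) i)).getD (j - x) 0))) ndp)
      ((List.range (N+1)).map (fun _ => (0:Int)))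
    = (List.range (N+1)).map (fun t =>
        if 1 ≤ t ∧ t ≤ k then altBest P (items.map (cRow P)) (i+1) t else 0) := by
  induction k with
  | zero =>
      simp only [List.range'_zero, List.foldl_nil]
      refine List.map_congr_left ?_
      intro t _
      rw [if_neg (by omega)]
  | succ k ih =>
      rw [List.range'_concat, List.foldl_append, ih (by omega)]
      simp only [List.foldl_cons, List.foldl_nil, one_mul]
      rw [show 1 + k = k + 1 by omega]
      rw [foldl_set_max _ (k+1) (by simp; omega) _ _]
      rw [PySem.List.getD_map_range _ _ _ _ (by omega), if_neg (by omega)]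
      rw [set_map_range]
      refine List.map_congr_left ?_
      intro t ht
      simp only [List.mem_range] at ht
      by_cases hteq : t = k + 1
      · rw [if_pos hteq, if_pos (by omega), hteq]
        rw [altBest, Nat.succ_min_succ]
        refine PySem.List.foldl_congr_mem _ _ _ _ ?_
        intro acc x _
        rw [PySem.List.getD_map_range _ _ _ _ (by omega)]
      · rw [if_neg hteq]
        by_cases hc : 1 ≤ t ∧ t ≤ k
        · rw [if_pos hc, if_pos (by omega)]
        · rw [if_neg hc, if_neg (by omega)]

theorem row_eq (P N i : Nat) (items : List (List Int)) :
    (List.range' 1 N).foldl (fun ndp j =>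
      (List.range (min (j+1) (P+1))).foldl (fun ndp x =>
        ndp.set j (max (ndp.getD j 0)
          (((items.map (cRow P)).getD (i+1) []).getD x 0 +
           ((List.range (N+1)).map (altBest P (items.map (cRow P)) i)).getD (j - x) 0))) ndp)
      ((List.range (N+1)).map (fun _ => (0:Int)))
    = (List.range (N+1)).map (altBest P (items.map (cRow P)) (i+1)) := by
  rw [row_aux P N i items N le_rfl]
  refine List.map_congr_left ?_
  intro t ht
  simp only [List.mem_range] at ht
  by_cases h0 : 1 ≤ t ∧ t ≤ N
  · rw [if_pos h0]
  · have ht0 : t = 0 := by omega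
    rw [if_neg h0, ht0, altBest_zero]

theorem outer_eq (P N : Nat) (items : List (List Int)) (K : Nat) :
    (List.range' 1 K).foldl (fun dp i =>
      (List.range' 1 N).foldl (fun ndp j =>
        (List.range (min (j+1) (P+1))).foldl (fun ndp x =>
          ndp.set j (max (ndp.getD j 0)
            (((items.map (cRow P)).getD i []).getD x 0 + dp.getD (j - x) 0))) ndp)
        ((List.range (N+1)).map (fun _ => (0:Int))))
      ((List.range (N+1)).map (altBest P (items.map (cRow P)) 0))
    = (List.range (N+1)).map (altBest P (items.map (cRow P)) K) := by
  induction K with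
  | zero => simp
  | succ K ih =>
      rw [List.range'_concat, List.foldl_append, ih]
      simp only [List.foldl_cons, List.foldl_nil, one_mul]
      rw [show 1 + K = K + 1 by omega]
      exact row_eq P N K items

theorem dp0_eq (items : List (List Int)) (hne : items ≠ []) (N : Nat) :
    (List.range (N+1)).map (fun i =>
        if i < (items.getD 0 []).length
        then ((items.map (cRow (items.getD 0 []).length)).getD 0 []).getD i 0
        else PySem.List.pyGetD ((items.map (cRow (items.getD 0 []).length)).getD 0 []) (-1) 0)
    = (List.range (N+1)).map
        (altBest (items.getD 0 []).length (items.map (cRow (items.getD 0 []).length)) 0) := by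
  have hlen : 0 < items.length := List.length_pos_of_ne_nil hne
  have h0 : (items.map (cRow (items.getD 0 []).length)).getD 0 []
      = cRow (items.getD 0 []).length (items.getD 0 []) := by
    rw [getD_map_of_lt _ _ _ _ hlen, List.getD_eq_getElem _ _ hlen]
  refine List.map_congr_left ?_
  intro i _
  rw [h0, altBest, h0]
  by_cases hi : i < (items.getD 0 []).length
  · rw [if_pos hi, Nat.min_eq_left (by omega)]
  · rw [if_neg hi, Nat.min_eq_right (by omega)]
    rw [PySem.List.pyGetD_neg_one _ _ (by simp [cRow])]
    rw [List.getLast_eq_getElem]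
    simp only [cRow]
    rw [PySem.List.getD_map_range _ _ _ _ (by omega)]
    simp

theorem pyGetD_neg_one_map_range (N : Nat) (f : Nat → Int) :
    PySem.List.pyGetD ((List.range (N+1)).map f) (-1) 0 = f N := by
  rw [PySem.List.pyGetD_neg_one _ _ (by simp), List.getLast_eq_getElem]
  simp

theorem array_getD_eq_toList (a : Array Int) (i : Nat) (d : Int) :
    a.getD i d = a.toList.getD i d := by
  unfold Array.getD List.getD
  split
  · rw [List.getElem?_eq_getElem (by simpa using ‹_›)]; simp
  · rw [List.getElem?_eq_none (by simp; omega)]; rfl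

theorem foldl_toList {σ : Type} (step : Array Int → σ → Array Int) (step' : List Int → σ → List Int)
    (h : ∀ (a : Array Int) (x : σ), (step a x).toList = step' a.toList x) :
    ∀ (l : List σ) (a : Array Int), (l.foldl step a).toList = l.foldl step' a.toList := by
  intro l
  induction l with
  | nil => intro a; rfl
  | cons x xs ih => intro a; simp only [List.foldl_cons, ih, h]

-- the Array-based dp loop of port A computes (elementwise) the list-based loop
theorem arr_outer_toList (C : List (List Int)) (P nn K : Nat) (dp0 : List Int) :
    ((List.range' 1 K).foldl (fun dp i =>
        (List.range' 1 (nn - 1)).foldl (fun ndp j =>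
          (List.range (min (j + 1) (P + 1))).foldl (fun ndp x =>
            ndp.setIfInBounds j (max (ndp.getD j 0)
              ((C.getD i []).getD x 0 + dp.getD (j - x) 0))) ndp)
          (((List.range nn).map (fun _ => (0 : Int))).toArray))
        dp0.toArray).toList
    = (List.range' 1 K).foldl (fun dp i =>
        (List.range' 1 (nn - 1)).foldl (fun ndp j =>
          (List.range (min (j + 1) (P + 1))).foldl (fun ndp x =>
            ndp.set j (max (ndp.getD j 0)
              ((C.getD i []).getD x 0 + dp.getD (j - x) 0))) ndp)
          ((List.range nn).map (fun _ => (0 : Int)))) dp0 := by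
  have hinner : ∀ (a : Array Int) (i : Nat) (nd : Array Int) (j : Nat),
      ((List.range (min (j + 1) (P + 1))).foldl (fun ndp x =>
          ndp.setIfInBounds j (max (ndp.getD j 0)
            ((C.getD i []).getD x 0 + a.getD (j - x) 0))) nd).toList
      = (List.range (min (j + 1) (P + 1))).foldl (fun ndp x =>
          ndp.set j (max (ndp.getD j 0)
            ((C.getD i []).getD x 0 + a.toList.getD (j - x) 0))) nd.toList := by
    intro a i nd j
    refine foldl_toList _ (fun (bL : List Int) (x : Nat) =>
      bL.set j (max (bL.getD j 0) ((C.getD i []).getD x 0 + a.toList.getD (j - x) 0))) ?_ _ _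
    intro b x
    rw [Array.toList_setIfInBounds, array_getD_eq_toList, array_getD_eq_toList]
  have houter : ∀ (a : Array Int) (i : Nat),
      ((List.range' 1 (nn - 1)).foldl (fun ndp j =>
          (List.range (min (j + 1) (P + 1))).foldl (fun ndp x =>
            ndp.setIfInBounds j (max (ndp.getD j 0)
              ((C.getD i []).getD x 0 + a.getD (j - x) 0))) ndp)
          (((List.range nn).map (fun _ => (0 : Int))).toArray)).toList
      = (List.range' 1 (nn - 1)).foldl (fun ndp j =>
          (List.range (min (j + 1) (P + 1))).foldl (fun ndp x =>
            ndp.set j (max (ndp.getD j 0)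
              ((C.getD i []).getD x 0 + a.toList.getD (j - x) 0))) ndp)
          ((List.range nn).map (fun _ => (0 : Int))) := by
    intro a i
    rw [foldl_toList _ (fun (ndpL : List Int) (j : Nat) =>
        (List.range (min (j + 1) (P + 1))).foldl (fun ndp x =>
          ndp.set j (max (ndp.getD j 0)
            ((C.getD i []).getD x 0 + a.toList.getD (j - x) 0))) ndpL)
      (hinner a i)]
  rw [foldl_toList _ (fun (dpL : List Int) (i : Nat) =>
      (List.range' 1 (nn - 1)).foldl (fun ndp j =>
        (List.range (min (j + 1) (P + 1))).foldl (fun ndp x =>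
          ndp.set j (max (ndp.getD j 0)
            ((C.getD i []).getD x 0 + dpL.getD (j - x) 0))) ndp)
        ((List.range nn).map (fun _ => (0 : Int)))) houter]

theorem dp_save_space_spec' : ∀ (n : Int) (items : List (List Int)),
    Pre_dp_save_space n items → dp_save_space n items = dp_save_space_alt n items := by
  intro n items hpre
  obtain ⟨hn, hne⟩ := hpre
  unfold dp_save_space dp_save_space_alt
  simp only []
  rw [aTable_eq ((items.getD 0 []).length) items]
  rw [arr_outer_toList]
  rw [headD_eq_getD, bTable_eq]
  rw [show (n+1).toNat = n.toNat + 1 by omega]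
  simp only [Nat.add_sub_cancel]
  rw [dp0_eq items hne n.toNat]
  rw [outer_eq ((items.getD 0 []).length) n.toNat items (items.length - 1)]
  rw [pyGetD_neg_one_map_range]

-- ===== VERDICT (by name: the statement is the Claim_ definition above) =====
theorem dp_save_space_spec : Claim_equal_dp_save_space := by
  intro n items _ hpre
  exact dp_save_space_spec' n items hpre
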